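-- pv_equiv track=rewrite | github.com/dfreddy/NBA-Schedule-Optimiser | evaluator.py | calculate_team_days_score
-- ===== SOURCE A (Python) =====
-- def days_two_games(gameday_1, gameday_2):
--     diff = abs(gameday_2 - gameday_1)
--
--     if diff == 0:
--         return 100000000000
--     if diff == 1:
--         return 8
--     if diff == 2:
--         return 5
--     if diff == 3:
--         return 2
--     if diff == 4:
--         return 1
--     if diff >= 5:
--         return 0
--
-- def calculate_team_days_score(team_sch):
--     i = 1
--     score = 0
--
--     score = score + days_two_games(team_sch[0].get('day'), team_sch[1].get('day'))
--
--     while i < len(team_sch) - 1: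
--         score = score + days_two_games(team_sch[i - 1].get('day'), team_sch[i].get('day')) \
--                 + days_two_games(team_sch[i].get('day'), team_sch[i + 1].get('day'))
--         i = i + 1
--     score = score + days_two_games(team_sch[i - 1].get('day'), team_sch[i].get('day'))
--     return score
-- ===== SOURCE B (Python) =====
-- _PAIR_TABLE = {0: 100000000000, 1: 8, 2: 5, 3: 2, 4: 1}
--
-- def pair_score(g1, g2):
--     return _PAIR_TABLE.get(abs(g2 - g1), 0)
--
-- def calculate_team_days_score(team_sch):
--     # A adds every consecutive-pair score exactly twice, so the total is
--     # 2 * (sum over consecutive pairs).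
--     days = [g.get('day') for g in team_sch]
--     return 2 * sum(pair_score(a, b) for a, b in zip(days, days[1:]))
-- ===== Notes on version B (the rewrite author's own statement) =====
-- stated objective: simpler
-- what changed: Replaced A's overlapping two-call sliding window (which scores every consecutive pair twice) by a single zip pass summing each consecutive pair once, returning twice the sum, with the branch chain replaced by a table lookup.
import Mathlib
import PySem

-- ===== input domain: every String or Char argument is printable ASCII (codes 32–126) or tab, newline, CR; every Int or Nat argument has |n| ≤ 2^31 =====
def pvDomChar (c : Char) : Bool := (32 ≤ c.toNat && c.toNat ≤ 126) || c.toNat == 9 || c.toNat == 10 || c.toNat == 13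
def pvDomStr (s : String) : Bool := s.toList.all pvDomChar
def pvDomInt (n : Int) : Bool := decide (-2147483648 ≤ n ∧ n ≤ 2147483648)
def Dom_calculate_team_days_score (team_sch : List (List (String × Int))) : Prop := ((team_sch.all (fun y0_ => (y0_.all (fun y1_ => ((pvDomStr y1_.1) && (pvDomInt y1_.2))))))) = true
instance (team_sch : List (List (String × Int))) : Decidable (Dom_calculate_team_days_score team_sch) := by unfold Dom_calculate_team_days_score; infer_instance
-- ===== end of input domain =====

-- B replaces A's overlapping two-call sliding window by one pass summing each consecutive
-- pair once and doubling the sum (objective: simpler).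

-- ===== PORT A =====

-- team_sch[i].get('day'); the none cases (IndexError / missing 'day' key, on which the
-- Python raises) occur only outside Pre_, where 0 is an arbitrary default.
def dayA (ts : List (List (String × Int))) (i : Nat) : Int :=
  match PySem.List.pyGet? ts (i : Int) with
  | some g => ((PySem.Dict.mk g).get? "day").getD 0
  | none => 0

def days_two_games (gameday_1 gameday_2 : Int) : Int :=
  let diff := |gameday_2 - gameday_1|
  if diff = 0 then 100000000000
  else if diff = 1 then 8
  else if diff = 2 then 5
  else if diff = 3 then 2
  else if diff = 4 then 1
  else 0  -- diff ≥ 5; since diff = |…| ≥ 0 the Python fall-through (returning None) is unreachable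

-- the while loop; returns (final i, final score).  i starts at 1 and only grows, so Nat
-- subtraction i - 1 matches Python's i - 1 exactly.
def aLoop (ts : List (List (String × Int))) (n i : Nat) (score : Int) : Nat × Int :=
  if i < n - 1 then
    aLoop ts n (i + 1) (score + days_two_games (dayA ts (i - 1)) (dayA ts i)
                              + days_two_games (dayA ts i) (dayA ts (i + 1)))
  else (i, score)
termination_by n - 1 - i
decreasing_by omega

def calculate_team_days_score (team_sch : List (List (String × Int))) : Int :=
  let score : Int := 0 + days_two_games (dayA team_sch 0) (dayA team_sch 1)
  let r := aLoop team_sch team_sch.length 1 score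
  r.2 + days_two_games (dayA team_sch (r.1 - 1)) (dayA team_sch r.1)

-- ===== PORT B =====

def pairTable : PySem.Dict Int Int := PySem.Dict.mk [(0, 100000000000), (1, 8), (2, 5), (3, 2), (4, 1)]

def pair_score (g1 g2 : Int) : Int := pairTable.getD (|g2 - g1|) 0

def calculate_team_days_score_alt (team_sch : List (List (String × Int))) : Int :=
  -- g.get('day'); None (missing key) only occurs outside Pre_, where 0 is an arbitrary default
  let days := team_sch.map (fun g => ((PySem.Dict.mk g).get? "day").getD 0)
  2 * (days.zip days.tail).foldl (fun acc p => acc + pair_score p.1 p.2) 0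

-- ===== PRECONDITION & SPEC =====
-- Pre_ excludes exactly the inputs where the Python A raises: fewer than 2 games
-- (IndexError on team_sch[0]/team_sch[1]) or a game dict without a 'day' key
-- (.get returns None, then abs(None - …) raises TypeError).
def Pre_calculate_team_days_score (team_sch : List (List (String × Int))) : Prop :=
  2 ≤ team_sch.length ∧ ∀ g ∈ team_sch, (((PySem.Dict.mk g).get? "day")).isSome
instance (team_sch : List (List (String × Int))) : Decidable (Pre_calculate_team_days_score team_sch) := by unfold Pre_calculate_team_days_score; infer_instance

def pvWitness_calculate_team_days_score : (List (List (String × Int))) :=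
  [[("day", 1)], [("day", 3)], [("day", 4)]]

def Spec_calculate_team_days_score (team_sch : List (List (String × Int))) (out : Int) : Prop := out = calculate_team_days_score_alt team_sch
instance (team_sch : List (List (String × Int))) (out : Int) : Decidable (Spec_calculate_team_days_score team_sch out) := by unfold Spec_calculate_team_days_score; infer_instance

-- ===== CLAIM (what is proved, stated in full; the proofs are below) =====
def Claim_equal_calculate_team_days_score : Prop := ∀ (team_sch : List (List (String × Int))), Dom_calculate_team_days_score team_sch → Pre_calculate_team_days_score team_sch → Spec_calculate_team_days_score team_sch (calculate_team_days_score team_sch)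

-- ===== LEMMAS AND PROOFS =====

-- B's table lookup computes the same pair score as A's branch chain
theorem pair_score_eq (a b : Int) : pair_score a b = days_two_games a b := by
  simp only [pair_score, pairTable, days_two_games, PySem.Dict.getD_eq_get?_getD,
    PySem.Dict.get?_mk_cons]
  set d := |b - a| with hd
  simp only [PySem.Dict.get?, List.find?]
  split_ifs <;> simp_all

-- B's day list agrees pointwise (with default) with A's indexed day access
theorem day_map (ts : List (List (String × Int))) (j : Nat) :
    (ts.map (fun g => ((PySem.Dict.mk g).get? "day").getD 0)).getD j 0 = dayA ts j := by
  simp only [dayA, PySem.List.pyGet?_natCast, List.getD, List.getElem?_map]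
  cases ts[j]? <;> simp

-- closed form of A's while loop
theorem aLoop_eq (ts : List (List (String × Int))) (n : Nat) :
    ∀ (k i : Nat) (s : Int), 1 ≤ i → i + k = n - 1 →
    aLoop ts n i s = (i + k, s + ∑ j ∈ Finset.range k,
      (days_two_games (dayA ts (i - 1 + j)) (dayA ts (i + j)) +
       days_two_games (dayA ts (i + j)) (dayA ts (i + 1 + j)))) := by
  intro k
  induction k with
  | zero =>
    intro i s hi hk
    rw [aLoop]
    simp [show ¬ (i < n - 1) by omega]
  | succ k ih =>
    intro i s hi hk
    obtain ⟨m, rfl⟩ : ∃ m, i = m + 1 := ⟨i - 1, by omega⟩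
    rw [aLoop]
    rw [if_pos (by omega)]
    rw [ih (m + 2) _ (by omega) (by omega)]
    rw [Finset.sum_range_succ']
    simp only [Nat.add_succ, Nat.succ_add, Nat.add_zero, Nat.succ_sub_one]
    congr 1
    ring

-- first + Σ (overlapping pairs) + last = twice the sum of consecutive pairs
theorem telescope (f : Nat → Int) (k : Nat) :
    f 0 + (∑ j ∈ Finset.range k, (f j + f (j + 1))) + f k
      = 2 * ∑ j ∈ Finset.range (k + 1), f j := by
  induction k with
  | zero => simp; ring
  | succ k ih =>
    rw [Finset.sum_range_succ (f := fun j => f j + f (j + 1))]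
    rw [Finset.sum_range_succ (n := k + 1)]
    linarith [ih]

-- B's zip-fold as an indexed sum
theorem zipfold (l : List Int) (acc : Int) :
    (l.zip l.tail).foldl (fun acc p => acc + pair_score p.1 p.2) acc
      = acc + ∑ j ∈ Finset.range (l.length - 1),
          days_two_games (l.getD j 0) (l.getD (j + 1) 0) := by
  induction l generalizing acc with
  | nil => simp
  | cons a t ih =>
    cases t with
    | nil => simp
    | cons b t =>
      simp only [List.tail_cons, List.zip_cons_cons, List.foldl_cons]
      simp only [List.tail_cons] at ih
      rw [ih]
      rw [pair_score_eq]
      simp only [List.length_cons, Nat.add_sub_cancel]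
      rw [Finset.sum_range_succ']
      simp only [List.getD_cons_succ, List.getD_cons_zero]
      ring

theorem main_eq (ts : List (List (String × Int))) (h : 2 ≤ ts.length) :
    calculate_team_days_score ts = calculate_team_days_score_alt ts := by
  obtain ⟨k, hk⟩ : ∃ k, ts.length = k + 2 := ⟨ts.length - 2, by omega⟩
  simp only [calculate_team_days_score, calculate_team_days_score_alt]
  rw [zipfold]
  simp only [hk, day_map, List.length_map]
  rw [aLoop_eq ts (k + 2) k 1 _ (by omega) (by omega)]
  have e1 : ∀ j : Nat, 1 - 1 + j = j := by omega
  have e2 : ∀ j : Nat, 1 + j = j + 1 := by omega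
  have e3 : ∀ j : Nat, 1 + 1 + j = j + 1 + 1 := by omega
  have e4 : k + 2 - 1 = k + 1 := by omega
  simp only [e1, e2, e3, e4, Nat.add_sub_cancel]
  have := telescope (fun j => days_two_games (dayA ts j) (dayA ts (j + 1))) k
  simp only [] at this
  linarith [this]

-- ===== VERDICT (by name: the statement is the Claim_ definition above) =====
theorem calculate_team_days_score_spec : Claim_equal_calculate_team_days_score := by
  intro ts _ hpre
  unfold Spec_calculate_team_days_score
  exact main_eq ts hpre.1
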